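-- pv_equiv track=rewrite | github.com/dhruvbha/UTF8-Encoder | utf8encoder.py | utf8Convertor
-- ===== SOURCE A (Python) =====
-- def utf8Convertor(input):
--     result=[]
--     for item in input:
--         if item < int('10000000', 2):
--             utf8Data = bin(0b1111111 & item)[2:]
--             space = '0'* (7-len(utf8Data))
--             utf8Data = '0'+space+utf8Data
--             result.append(utf8Data)
--         elif item < int('100000000000', 2):
--             utf8DataLow = bin(0b111111 & item)[2:]
--             spaceLow = '0'* (6-len(utf8DataLow))
--             utf8DataLow = '10' + spaceLow + utf8DataLow
--             utf8DataHigh = bin(0b11111000000 & item)[2:-6]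
--             spaceHigh = '0'* (5-len(utf8DataHigh))
--             utf8DataHigh = '110' + spaceHigh + utf8DataHigh
--             utfData =  utf8DataHigh + utf8DataLow
--             result.append(utfData)
--         else:
--             utf8DataLow = bin(0b111111 & item)[2:]
--             spaceLow = '0' * (6 - len(utf8DataLow))
--             utf8DataLow = '10' + spaceLow + utf8DataLow
--             utf8DataMid = bin(0b111111000000 & item)[2:-6]
--             spaceMid = '0' * (6 - len(utf8DataMid))
--             utf8DataMid = '10' + spaceMid + utf8DataMid
--             utf8DataHigh = bin(0b1111000000000000 & item)[2:-12]
--             spaceHigh = '0' * (4 - len(utf8DataHigh))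
--             utf8DataHigh = '1110' + spaceHigh + utf8DataHigh
--             utf8Data = utf8DataHigh + utf8DataMid + utf8DataLow
--             result.append(utf8Data)
--     return result
-- ===== SOURCE B (Python) =====
-- def utf8Convertor(input):
--     result = []
--     for item in input:
--         if item < 128:
--             result.append('0' + format(item % 128, '07b'))
--         else:
--             b = 2 if item < 2048 else 3
--             w = 7 - b
--             bits = '1' * b + '0' + format(item // 64 ** (b - 1) % (1 << w), '0%db' % w)
--             for i in range(b - 1, 0, -1):
--                 bits += '10' + format(item // 64 ** (i - 1) % 64, '06b')
--             result.append(bits)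
--     return result
-- ===== Notes on version B (the rewrite author's own statement) =====
-- stated objective: simpler
-- what changed: A builds each byte by bin()-string surgery (mask, strip '0b', slice off low bits, hand-computed zero padding, three fully unrolled branches); B computes the byte count, emits the leading byte and then the continuation bytes in a single countdown loop, each bit field rendered directly with fixed-width '0{w}b' formatting via shifts (// and %) instead of string slicing.
import Mathlib
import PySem

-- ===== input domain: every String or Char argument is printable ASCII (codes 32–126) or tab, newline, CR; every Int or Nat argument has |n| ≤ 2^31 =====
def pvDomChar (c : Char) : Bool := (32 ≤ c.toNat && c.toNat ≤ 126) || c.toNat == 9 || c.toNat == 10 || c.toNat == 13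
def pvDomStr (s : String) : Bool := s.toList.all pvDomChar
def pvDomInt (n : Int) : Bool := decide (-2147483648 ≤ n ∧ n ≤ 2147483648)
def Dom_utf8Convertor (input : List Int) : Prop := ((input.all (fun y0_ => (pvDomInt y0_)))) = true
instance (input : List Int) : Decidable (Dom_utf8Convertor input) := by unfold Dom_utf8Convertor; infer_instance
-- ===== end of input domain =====

-- B replaces A's per-branch bin()/slice/pad string surgery by one fixed-width bit-field
-- formatter plus a countdown loop over continuation bytes (simpler decomposition, same values).

-- ===== PORT A =====
-- bit n → its character, used by both ports' binary renderers
def pvBitChar (b : Nat) : Char := if b = 1 then '1' else '0'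

-- bin(n)[2:] for n ≥ 0, as a list of chars (exact: Python's bin without the '0b' prefix)
def pvBinAux (n : Nat) (acc : List Char) : List Char :=
  if h : n = 0 then acc else pvBinAux (n / 2) (pvBitChar (n % 2) :: acc)
termination_by n
decreasing_by exact Nat.div_lt_self (Nat.pos_of_ne_zero h) one_lt_two

def pvBin (n : Nat) : List Char := if n = 0 then ['0'] else pvBinAux n []

-- one loop body of A; bin(mask & item)[2:] is pvBin of the (always nonnegative) masked value,
-- [2:-k] is List.take (length - k); PySem.Int.band is Python's & on ints (exact, incl. negatives)
def pvEncA (item : Int) : String :=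
  if item < 128 then
    let utf8Data := pvBin ((PySem.Int.band 127 item).toNat)
    let space := List.replicate (7 - utf8Data.length) '0'
    String.ofList ('0' :: (space ++ utf8Data))
  else if item < 2048 then
    let lraw := pvBin ((PySem.Int.band 63 item).toNat)
    let low := '1' :: '0' :: (List.replicate (6 - lraw.length) '0' ++ lraw)
    let hraw := pvBin ((PySem.Int.band 1984 item).toNat)
    let hslice := List.take (hraw.length - 6) hraw
    let high := '1' :: '1' :: '0' :: (List.replicate (5 - hslice.length) '0' ++ hslice)
    String.ofList (high ++ low)
  else
    let lraw := pvBin ((PySem.Int.band 63 item).toNat)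
    let low := '1' :: '0' :: (List.replicate (6 - lraw.length) '0' ++ lraw)
    let mraw := pvBin ((PySem.Int.band 4032 item).toNat)
    let mslice := List.take (mraw.length - 6) mraw
    let mid := '1' :: '0' :: (List.replicate (6 - mslice.length) '0' ++ mslice)
    let hraw := pvBin ((PySem.Int.band 61440 item).toNat)
    let hslice := List.take (hraw.length - 12) hraw
    let high := '1' :: '1' :: '1' :: '0' :: (List.replicate (4 - hslice.length) '0' ++ hslice)
    String.ofList (high ++ mid ++ low)

def utf8Convertor (input : List Int) : List String :=
  input.foldl (fun result item => result ++ [pvEncA item]) []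

-- ===== PORT B =====
-- format(v, '0{w}b') for 0 ≤ v < 2^w: exactly w binary digits, left-padded with '0'
def pvToBits : Nat → Nat → List Char
  | 0, _ => []
  | w + 1, n => pvToBits w (n / 2) ++ [pvBitChar (n % 2)]

-- one loop body of B: byte count b, a leading byte, then b-1 continuation bytes (countdown loop)
def pvEncB (item : Int) : String :=
  if item < 128 then
    String.ofList ('0' :: pvToBits 7 (PySem.Int.mod item 128).toNat)
  else
    let b : Nat := if item < 2048 then 2 else 3
    let w := 7 - b
    let lead := List.replicate b '1' ++
      '0' :: pvToBits w (PySem.Int.mod (PySem.Int.floordiv item (64 ^ (b - 1))) (2 ^ w)).toNat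
    let bits := (PySem.List.pyRange ((b : Int) - 1) 0 (-1)).foldl
      (fun bits i => bits ++ '1' :: '0' ::
        pvToBits 6 (PySem.Int.mod (PySem.Int.floordiv item (64 ^ (i - 1).toNat)) 64).toNat) lead
    String.ofList bits

def utf8Convertor_alt (input : List Int) : List String := input.map pvEncB

-- ===== PRECONDITION & SPEC =====
def Spec_utf8Convertor (input : List Int) (out : List String) : Prop := out = utf8Convertor_alt input
instance (input : List Int) (out : List String) : Decidable (Spec_utf8Convertor input out) := by unfold Spec_utf8Convertor; infer_instance

-- ===== CLAIM (what is proved, stated in full; the proofs are below) =====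
def Claim_equal_utf8Convertor : Prop := ∀ (input : List Int), Dom_utf8Convertor input → Spec_utf8Convertor input (utf8Convertor input)

-- ===== LEMMAS AND PROOFS =====

theorem pvBinAux_acc (n : Nat) (acc : List Char) :
    pvBinAux n acc = pvBinAux n [] ++ acc := by
  induction n using Nat.strong_induction_on generalizing acc with
  | _ n ih =>
    by_cases h : n = 0
    · subst h; simp [pvBinAux]
    · have hlt := Nat.div_lt_self (Nat.pos_of_ne_zero h) one_lt_two
      rw [pvBinAux, dif_neg h, ih _ hlt,
          show pvBinAux n [] = pvBinAux (n / 2) [pvBitChar (n % 2)] by rw [pvBinAux, dif_neg h],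
          ih _ hlt [pvBitChar (n % 2)]]
      simp

theorem pvBin_step (n : Nat) (h : 2 ≤ n) :
    pvBin n = pvBin (n / 2) ++ [pvBitChar (n % 2)] := by
  have h0 : n ≠ 0 := by omega
  have h2 : n / 2 ≠ 0 := by omega
  rw [pvBin, pvBin, if_neg h0, if_neg h2, pvBinAux, dif_neg h0, pvBinAux_acc]

theorem pvToBits_zero (w : Nat) : pvToBits w 0 = List.replicate w '0' := by
  induction w with
  | zero => rfl
  | succ w ih => rw [pvToBits, ih, pvBitChar]; simp [List.replicate_succ']

-- fixed-width zero-padding of pvBin is pvToBits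
theorem pvBin_zero : pvBin 0 = ['0'] := by rw [pvBin]; simp

theorem pvBin_one : pvBin 1 = ['1'] := by
  rw [pvBin, if_neg one_ne_zero, pvBinAux, dif_neg one_ne_zero]
  norm_num
  rw [pvBinAux]
  simp [pvBitChar]

theorem pad_pvBin (w n : Nat) (hw : 0 < w) (h : n < 2 ^ w) :
    List.replicate (w - (pvBin n).length) '0' ++ pvBin n = pvToBits w n := by
  induction w generalizing n with
  | zero => omega
  | succ w ih =>
    by_cases h0 : n = 0
    · subst h0
      rw [pvBin_zero, pvToBits_zero]
      simp [List.replicate_succ']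
    · rw [pvToBits]
      by_cases h1 : n < 2
      · have : n = 1 := by omega
        subst this
        norm_num [pvBin_one, pvToBits_zero, pvBitChar, List.replicate_succ']
      · have hw' : 0 < w := by
          rcases Nat.eq_zero_or_pos w with h2 | h2
          · subst h2; norm_num at h; omega
          · exact h2
        have hp : 2 ^ (w + 1) = 2 ^ w * 2 := pow_succ 2 w
        have hdiv : n / 2 < 2 ^ w := by omega
        rw [pvBin_step n (by omega), ← ih (n / 2) hw' hdiv]
        simp [Nat.succ_sub_succ, List.append_assoc]

theorem pvBin_mul_pow (k d : Nat) (hk : 0 < k) :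
    pvBin (k * 2 ^ d) = pvBin k ++ List.replicate d '0' := by
  induction d with
  | zero => simp
  | succ d ih =>
    have hpos : 1 ≤ k * 2 ^ d := Nat.mul_pos hk (Nat.two_pow_pos d)
    have hmul : k * 2 ^ (d + 1) = k * 2 ^ d * 2 := by ring
    have hdm : k * 2 ^ d * 2 / 2 = k * 2 ^ d ∧ k * 2 ^ d * 2 % 2 = 0 := by omega
    rw [hmul, pvBin_step _ (by omega), hdm.1, hdm.2, ih]
    simp [pvBitChar, List.replicate_succ', List.append_assoc]

-- A's sliced-and-padded field equals B's fixed-width field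
theorem field_eq (k w d : Nat) (hw : 0 < w) (hd : 0 < d) (hk : k < 2 ^ w) :
    List.replicate (w - (List.take ((pvBin (k * 2 ^ d)).length - d) (pvBin (k * 2 ^ d))).length) '0'
      ++ List.take ((pvBin (k * 2 ^ d)).length - d) (pvBin (k * 2 ^ d)) = pvToBits w k := by
  rcases Nat.eq_zero_or_pos k with h0 | h0
  · subst h0
    rw [Nat.zero_mul, pvBin_zero, pvToBits_zero]
    have h1 : (['0'] : List Char).length - d = 0 := by simp; omega
    rw [h1]
    simp
  · rw [pvBin_mul_pow k d h0]
    have hlen : (pvBin k ++ List.replicate d '0').length = (pvBin k).length + d := by simp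
    rw [hlen, Nat.add_sub_cancel, List.take_left]
    exact pad_pvBin w k hw hk

theorem and_shl (a b i : Nat) : a &&& (b <<< i) = ((a >>> i) &&& b) <<< i := by
  apply Nat.eq_of_testBit_eq; intro j
  simp [Nat.testBit_and, Nat.testBit_shiftLeft, Nat.testBit_shiftRight]
  by_cases h : i ≤ j <;> simp [h]

theorem and_mask (n w s : Nat) : n &&& ((2 ^ w - 1) <<< s) = n / 2 ^ s % 2 ^ w * 2 ^ s := by
  rw [and_shl, Nat.and_two_pow_sub_one_eq_mod, Nat.shiftRight_eq_div_pow, Nat.shiftLeft_eq]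

theorem nat_and_mod (n w : Nat) : (2 ^ w - 1) &&& n = n % 2 ^ w := by
  rw [Nat.and_comm]; exact Nat.and_two_pow_sub_one_eq_mod n w

theorem band127 (x : Int) : PySem.Int.band 127 x = x % 128 := by
  have key : ∀ m : Nat, 127 &&& m = m % 128 := fun m => by
    have h := nat_and_mod m 7; norm_num at h; exact h
  by_cases hx : 0 ≤ x
  · rw [PySem.Int.band_of_nonneg (by norm_num) hx,
        show (127:Int).toNat = 127 from rfl, key]
    omega
  · rw [PySem.Int.band, if_pos (by norm_num : (0:Int) ≤ 127), if_neg hx,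
        show (127:Int).toNat = 127 from rfl, key]
    omega

-- the per-item encodings agree
theorem band_nat (m n : Nat) : (PySem.Int.band ↑m ↑n).toNat = m &&& n := by
  rw [PySem.Int.band_of_nonneg (by positivity) (by positivity)]; simp

-- field_eq with the product pre-computed, convenient for rewriting
theorem field_eq' (k w d m : Nat) (hw : 0 < w) (hd : 0 < d) (hk : k < 2 ^ w)
    (hm : m = k * 2 ^ d) :
    List.replicate (w - (List.take ((pvBin m).length - d) (pvBin m)).length) '0'
      ++ List.take ((pvBin m).length - d) (pvBin m) = pvToBits w k := by
  subst hm; exact field_eq k w d hw hd hk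

-- field_eq' in the associativity/length-normal form the simplifier leaves behind
theorem field_eq2 (k w d m : Nat) (hw : 0 < w) (hd : 0 < d) (hk : k < 2 ^ w)
    (hm : m = k * 2 ^ d) (rest : List Char) :
    List.replicate (w - ((pvBin m).length - d)) '0'
      ++ (List.take ((pvBin m).length - d) (pvBin m) ++ rest) = pvToBits w k ++ rest := by
  have hlen : (List.take ((pvBin m).length - d) (pvBin m)).length = (pvBin m).length - d := by
    simp
  calc List.replicate (w - ((pvBin m).length - d)) '0'
        ++ (List.take ((pvBin m).length - d) (pvBin m) ++ rest)
      = (List.replicate (w - (List.take ((pvBin m).length - d) (pvBin m)).length) '0'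
          ++ List.take ((pvBin m).length - d) (pvBin m)) ++ rest := by
        rw [hlen, List.append_assoc]
    _ = pvToBits w k ++ rest := by rw [field_eq' k w d m hw hd hk hm]

-- the per-item encodings agree
theorem enc_eq (x : Int) : pvEncA x = pvEncB x := by
  simp only [pvEncA, pvEncB]
  by_cases h1 : x < 128
  · rw [if_pos h1, if_pos h1, band127,
        PySem.Int.mod_eq_emod_of_pos (by norm_num : (0:Int) < 128)]
    have hb : (x % 128).toNat < 2 ^ 7 := by omega
    rw [pad_pvBin 7 _ (by norm_num) hb]
  · rw [if_neg h1, if_neg h1]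
    obtain ⟨n, rfl⟩ : ∃ n : Nat, x = ↑n := ⟨x.toNat, by omega⟩
    have hn : 128 ≤ n := by exact_mod_cast not_lt.mp h1
    have hb63 : (PySem.Int.band 63 ↑n).toNat = n % 64 := by
      rw [show (63:Int) = ((63:Nat):Int) from by norm_num, band_nat]
      have h := nat_and_mod n 6; norm_num at h; exact h
    have hb1984 : (PySem.Int.band 1984 ↑n).toNat = n / 64 % 32 * 64 := by
      rw [show (1984:Int) = ((1984:Nat):Int) from by norm_num, band_nat, Nat.and_comm,
          show (1984:Nat) = (2 ^ 5 - 1) <<< 6 from by decide, and_mask]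
      norm_num
    have hb4032 : (PySem.Int.band 4032 ↑n).toNat = n / 64 % 64 * 64 := by
      rw [show (4032:Int) = ((4032:Nat):Int) from by norm_num, band_nat, Nat.and_comm,
          show (4032:Nat) = (2 ^ 6 - 1) <<< 6 from by decide, and_mask]
      norm_num
    have hb61440 : (PySem.Int.band 61440 ↑n).toNat = n / 4096 % 16 * 4096 := by
      rw [show (61440:Int) = ((61440:Nat):Int) from by norm_num, band_nat, Nat.and_comm,
          show (61440:Nat) = (2 ^ 4 - 1) <<< 12 from by decide, and_mask]
      norm_num
    by_cases h2 : (n:Int) < 2048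
    · rw [if_pos h2, if_pos h2]
      norm_num
      rw [show PySem.List.pyRange 1 0 (-1) = [1] from by decide]
      norm_num [hb63, hb1984]
      rw [field_eq2 (n / 64 % 32) 5 6 (n / 64 % 32 * 64) (by norm_num) (by norm_num)
            (by omega) rfl _,
          pad_pvBin 6 (n % 64) (by norm_num) (by omega)]
      rw [show ((n:Int) % 64).toNat = n % 64 from by omega,
          show ((n:Int) / 64 % 32).toNat = n / 64 % 32 from by omega,
          ← String.ofList_append]
      congr 1
    · rw [if_neg h2, if_neg h2]
      norm_num
      rw [show PySem.List.pyRange 2 0 (-1) = [2, 1] from by decide]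
      norm_num [hb63, hb4032, hb61440]
      rw [field_eq2 (n / 64 % 64) 6 6 (n / 64 % 64 * 64) (by norm_num) (by norm_num)
            (by omega) rfl _,
          field_eq2 (n / 4096 % 16) 4 12 (n / 4096 % 16 * 4096) (by norm_num) (by norm_num)
            (by omega) rfl _,
          pad_pvBin 6 (n % 64) (by norm_num) (by omega)]
      rw [show ((64:Int) ^ (Int.toNat 2 - 1)) = 64 from by decide,
          show ((n:Int) % 64).toNat = n % 64 from by omega,
          show ((n:Int) / 64 % 64).toNat = n / 64 % 64 from by omega,
          show ((n:Int) / 4096 % 16).toNat = n / 4096 % 16 from by omega,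
          ← String.ofList_append]
      congr 1

-- ===== VERDICT (by name: the statement is the Claim_ definition above) =====
theorem utf8Convertor_spec : Claim_equal_utf8Convertor := by
  intro input _
  unfold Spec_utf8Convertor utf8Convertor utf8Convertor_alt
  rw [PySem.List.foldl_append_singleton_eq_map]
  exact List.map_congr_left fun x _ => enc_eq x
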